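-- pv_equiv track=rewrite | github.com/naastassyaa/algorithms | main.py | replace_adjacent_ones
-- ===== SOURCE A (Python) =====
-- import copy
--
-- def is_valid(x, y, M, N):
--     return 0 <= x < M and 0 <= y < N
--
-- def replace_adjacent_ones(matrix):
--     M = len(matrix)
--     N = len(matrix[0])
--     matrix_copy = copy.deepcopy(matrix)
--
--     def has_adjacent_zero(x, y):
--         for dx in [-1, 0, 1]:
--             for dy in [-1, 0, 1]:
--                 if dx == 0 and dy == 0:
--                     continue
--                 new_x, new_y = x + dx, y + dy
--                 if is_valid(new_x, new_y, M, N) and matrix[new_x][new_y] == 0: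
--                     return True
--         return False
--
--     for x in range(M):
--         for y in range(N):
--             if matrix[x][y] == 1 and has_adjacent_zero(x, y):
--                 matrix_copy[x][y] = 0
--     return matrix_copy
-- ===== SOURCE B (Python) =====
-- def replace_adjacent_ones(matrix):
--     M = len(matrix)
--     N = len(matrix[0])
--     result = [list(row) for row in matrix]
--     for x in range(M):
--         for y in range(N):
--             if matrix[x][y] == 0:
--                 for i in range(max(0, x - 1), min(M, x + 2)):
--                     for j in range(max(0, y - 1), min(N, y + 2)):
--                         if matrix[i][j] == 1:
--                             result[i][j] = 0
--     return result
-- ===== Notes on version B (the rewrite author's own statement) =====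
-- stated objective: alternative
-- what changed: B scatters from zeros (for each 0-cell it clears the in-bounds 8-neighbours that hold a 1 in a copied grid) instead of A's gather (for each 1-cell, scan its 8 offsets for a zero), with clamped index ranges replacing A's offset list plus validity test.
import Mathlib
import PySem

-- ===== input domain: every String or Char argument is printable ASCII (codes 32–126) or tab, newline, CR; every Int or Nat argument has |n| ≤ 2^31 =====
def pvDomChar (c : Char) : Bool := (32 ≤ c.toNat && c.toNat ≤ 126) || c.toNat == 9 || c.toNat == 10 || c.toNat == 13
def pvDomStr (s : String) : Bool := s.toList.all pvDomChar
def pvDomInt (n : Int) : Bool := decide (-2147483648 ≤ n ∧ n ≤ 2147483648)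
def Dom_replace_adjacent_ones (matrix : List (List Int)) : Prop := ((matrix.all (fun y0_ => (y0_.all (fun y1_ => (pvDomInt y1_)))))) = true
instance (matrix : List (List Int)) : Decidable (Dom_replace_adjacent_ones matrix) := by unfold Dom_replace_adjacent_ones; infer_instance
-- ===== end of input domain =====

-- B clears, for every 0-cell, the in-bounds neighbours holding a 1 (scatter from zeros) instead of
-- A's scan of each 1-cell's eight offsets for a zero (gather); same O(M·N) cost, alternative algorithm.
-- A mutates only its private deepcopy, B only its private row copies: neither mutates the argument.

-- ===== PORT A =====
-- matrix[x][y] (reads are in range wherever A evaluates them on inputs admitted by Pre_)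
def pvAGet (matrix : List (List Int)) (x y : Int) : Int :=
  PySem.List.pyGetD (PySem.List.pyGetD matrix x []) y 0

def pvIsValid (x y M N : Int) : Bool :=
  decide (0 ≤ x ∧ x < M) && decide (0 ≤ y ∧ y < N)

def pvHasAdjacentZero (matrix : List (List Int)) (M N x y : Int) : Bool :=
  ([-1, 0, 1] : List Int).any fun dx =>
    ([-1, 0, 1] : List Int).any fun dy =>
      if dx == 0 && dy == 0 then false
      else pvIsValid (x + dx) (y + dy) M N && (pvAGet matrix (x + dx) (y + dy) == 0)

def replace_adjacent_ones (matrix : List (List Int)) : List (List Int) :=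
  let M : Int := PySem.List.len matrix
  let N : Int := PySem.List.len (PySem.List.pyGetD matrix 0 [])  -- len(matrix[0]); empty matrix raises, excluded by Pre_
  (PySem.List.pyRange 0 M 1).foldl (fun mc x =>
    (PySem.List.pyRange 0 N 1).foldl (fun mc y =>
      if pvAGet matrix x y == 1 && pvHasAdjacentZero matrix M N x y then
        PySem.List.pySetD mc x (PySem.List.pySetD (PySem.List.pyGetD mc x []) y 0)
      else mc) mc) matrix

-- ===== PORT B =====
def pvBGet (matrix : List (List Int)) (x y : Int) : Int :=
  PySem.List.pyGetD (PySem.List.pyGetD matrix x []) y 0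

def replace_adjacent_ones_alt (matrix : List (List Int)) : List (List Int) :=
  let M : Int := PySem.List.len matrix
  let N : Int := PySem.List.len (PySem.List.pyGetD matrix 0 [])
  (PySem.List.pyRange 0 M 1).foldl (fun res x =>
    (PySem.List.pyRange 0 N 1).foldl (fun res y =>
      if pvBGet matrix x y == 0 then
        (PySem.List.pyRange (max 0 (x - 1)) (min M (x + 2)) 1).foldl (fun res i =>
          (PySem.List.pyRange (max 0 (y - 1)) (min N (y + 2)) 1).foldl (fun res j =>
            if pvBGet matrix i j == 1 then
              PySem.List.pySetD res i (PySem.List.pySetD (PySem.List.pyGetD res i []) j 0)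
            else res) res) res
      else res) res) (matrix.map (fun row => row))

-- ===== PRECONDITION & SPEC =====
-- Exactly where Python A returns: a nonempty matrix (else len(matrix[0]) raises IndexError) each of
-- whose rows has at least len(matrix[0]) entries (else matrix[x][y] raises IndexError for some y < N).
def Pre_replace_adjacent_ones (matrix : List (List Int)) : Prop :=
  matrix ≠ [] ∧ ∀ row ∈ matrix, (matrix.headD []).length ≤ row.length
instance (matrix : List (List Int)) : Decidable (Pre_replace_adjacent_ones matrix) := by
  unfold Pre_replace_adjacent_ones; infer_instance

def pvWitness_replace_adjacent_ones : List (List Int) := [[1, 0], [1, 1]]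

def Spec_replace_adjacent_ones (matrix : List (List Int)) (out : List (List Int)) : Prop := out = replace_adjacent_ones_alt matrix
instance (matrix : List (List Int)) (out : List (List Int)) : Decidable (Spec_replace_adjacent_ones matrix out) := by unfold Spec_replace_adjacent_ones; infer_instance

-- ===== CLAIM (what is proved, stated in full; the proofs are below) =====
def Claim_equal_replace_adjacent_ones : Prop := ∀ (matrix : List (List Int)), Dom_replace_adjacent_ones matrix → Pre_replace_adjacent_ones matrix → Spec_replace_adjacent_ones matrix (replace_adjacent_ones matrix)

-- ===== LEMMAS AND PROOFS =====

-- entry (i, j) of a matrix, as an Option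
def pvEnt (m : List (List Int)) (i j : Nat) : Option Int := m[i]?.bind (fun r => r[j]?)

-- the write both ports perform, in pySetD form, rewritten to List.set form
theorem pvStep_eq (m : List (List Int)) (x y : Int) (hx : 0 ≤ x) (hy : 0 ≤ y) :
    PySem.List.pySetD m x (PySem.List.pySetD (PySem.List.pyGetD m x []) y 0) =
    m.set x.toNat ((m.getD x.toNat []).set y.toNat 0) := by
  obtain ⟨nx, rfl⟩ : ∃ n : Nat, x = (n : Int) := ⟨x.toNat, (Int.toNat_of_nonneg hx).symm⟩
  obtain ⟨ny, rfl⟩ : ∃ n : Nat, y = (n : Int) := ⟨y.toNat, (Int.toNat_of_nonneg hy).symm⟩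
  simp [PySem.List.pySetD_natCast, PySem.List.pyGetD_natCast]

theorem pvEnt_wr (m : List (List Int)) (a b i j : Nat) :
    pvEnt (m.set a ((m.getD a []).set b 0)) i j =
      if a = i ∧ b = j then (pvEnt m i j).map (fun _ => (0 : Int)) else pvEnt m i j := by
  by_cases hai : a = i
  · subst hai
    by_cases hlen : a < m.length
    · simp only [pvEnt, List.getElem?_set_self hlen, List.getD_eq_getElem m [] hlen,
        List.getElem?_eq_getElem hlen, Option.bind_some, List.getElem?_set]
      by_cases hbj : b = j
      · subst hbj
        by_cases hj : b < m[a].length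
        · simp [hj]
        · simp [hj]
      · simp [hbj]
    · rw [List.set_eq_of_length_le (by omega)]
      have hnone : m[a]? = none := List.getElem?_eq_none (by omega)
      simp only [pvEnt, hnone, Option.bind_none]
      split <;> rfl
  · simp only [pvEnt, List.getElem?_set_ne hai]
    split <;> rename_i h
    · exact absurd h.1 hai
    · rfl

-- entry after a fold of guarded zero-writes
theorem pvEnt_foldl_write {α : Type} (P : α → Bool) (px py : α → Int)
    (cs : List α) (m : List (List Int)) (i j : Nat)
    (hnn : ∀ c ∈ cs, 0 ≤ px c ∧ 0 ≤ py c) :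
    pvEnt (cs.foldl (fun mc c => if P c then
        PySem.List.pySetD mc (px c) (PySem.List.pySetD (PySem.List.pyGetD mc (px c) []) (py c) 0)
      else mc) m) i j
    = if ∃ c ∈ cs, P c = true ∧ (px c).toNat = i ∧ (py c).toNat = j
      then (pvEnt m i j).map (fun _ => (0 : Int)) else pvEnt m i j := by
  induction cs generalizing m with
  | nil => simp
  | cons c cs ih =>
    have hc := hnn c (List.mem_cons_self)
    have hcs : ∀ c' ∈ cs, 0 ≤ px c' ∧ 0 ≤ py c' := fun c' h => hnn c' (List.mem_cons_of_mem _ h)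
    simp only [List.foldl_cons]
    rw [ih _ hcs]
    by_cases hP : P c = true
    · rw [if_pos hP, pvStep_eq _ _ _ hc.1 hc.2, pvEnt_wr]
      by_cases hm : (px c).toNat = i ∧ (py c).toNat = j
      · rw [if_pos hm]
        have hcond : ∃ c' ∈ c :: cs, P c' = true ∧ (px c').toNat = i ∧ (py c').toNat = j :=
          ⟨c, List.mem_cons_self, hP, hm⟩
        rw [if_pos hcond]
        split
        · cases pvEnt m i j <;> rfl
        · rfl
      · rw [if_neg hm]
        by_cases hex : ∃ c' ∈ cs, P c' = true ∧ (px c').toNat = i ∧ (py c').toNat = j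
        · rw [if_pos hex, if_pos (by obtain ⟨c', h1, h2⟩ := hex; exact ⟨c', List.mem_cons_of_mem _ h1, h2⟩)]
        · rw [if_neg hex, if_neg ?_]
          rintro ⟨c', hmem, h2⟩
          rcases List.mem_cons.mp hmem with rfl | hmem'
          · exact hm h2.2
          · exact hex ⟨c', hmem', h2⟩
    · rw [if_neg hP]
      by_cases hex : ∃ c' ∈ cs, P c' = true ∧ (px c').toNat = i ∧ (py c').toNat = j
      · rw [if_pos hex, if_pos (by obtain ⟨c', h1, h2⟩ := hex; exact ⟨c', List.mem_cons_of_mem _ h1, h2⟩)]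
      · rw [if_neg hex, if_neg ?_]
        rintro ⟨c', hmem, h2⟩
        rcases List.mem_cons.mp hmem with rfl | hmem'
        · exact hP h2.1
        · exact hex ⟨c', hmem', h2⟩

-- shape after such a fold
theorem pvShape_foldl_write {α : Type} (P : α → Bool) (px py : α → Int)
    (cs : List α) (m : List (List Int))
    (hnn : ∀ c ∈ cs, 0 ≤ px c ∧ 0 ≤ py c) :
    (cs.foldl (fun mc c => if P c then
        PySem.List.pySetD mc (px c) (PySem.List.pySetD (PySem.List.pyGetD mc (px c) []) (py c) 0)
      else mc) m).map List.length = m.map List.length := by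
  induction cs generalizing m with
  | nil => simp
  | cons c cs ih =>
    have hc := hnn c List.mem_cons_self
    have hcs : ∀ c' ∈ cs, 0 ≤ px c' ∧ 0 ≤ py c' := fun c' h => hnn c' (List.mem_cons_of_mem _ h)
    simp only [List.foldl_cons]
    rw [ih _ hcs]
    by_cases hP : P c = true
    · rw [if_pos hP, pvStep_eq _ _ _ hc.1 hc.2]
      by_cases ha : (px c).toNat < m.length
      · rw [List.map_set]
        simp only [List.length_set, List.getD_eq_getElem m [] ha]
        rw [show m[(px c).toNat].length = (m.map List.length)[(px c).toNat]'(by simpa using ha)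
            from by simp, List.set_getElem_self]
      · rw [List.set_eq_of_length_le (by omega)]
    · rw [if_neg hP]

theorem pvMatrix_ext (m1 m2 : List (List Int))
    (hs : m1.map List.length = m2.map List.length)
    (he : ∀ i j, pvEnt m1 i j = pvEnt m2 i j) : m1 = m2 := by
  have hlen : m1.length = m2.length := by
    have := congrArg List.length hs; simpa using this
  apply List.ext_getElem?
  intro i
  by_cases hi : i < m1.length
  · have h2 : i < m2.length := by omega
    have hrow : m1[i].length = m2[i].length := by
      have := congrArg (fun l => l[i]?) hs
      simpa [List.getElem?_map, List.getElem?_eq_getElem, hi, h2] using this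
    have : m1[i] = m2[i] := by
      apply List.ext_getElem?
      intro j
      have := he i j
      simpa [pvEnt, List.getElem?_eq_getElem, hi, h2] using this
    simp [hi, h2, this]
  · simp [List.getElem?_eq_none (show m1.length ≤ i by omega),
      List.getElem?_eq_none (show m2.length ≤ i by omega)]

-- the flat cell lists the two ports' nested loops traverse
def pvCellsA (M N : Int) : List (Int × Int) :=
  (PySem.List.pyRange 0 M 1).flatMap fun x =>
    (PySem.List.pyRange 0 N 1).map fun y => (x, y)

def pvCellsB (matrix : List (List Int)) (M N : Int) : List (Int × Int) :=
  (PySem.List.pyRange 0 M 1).flatMap fun x =>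
    (PySem.List.pyRange 0 N 1).flatMap fun y =>
      if pvBGet matrix x y == 0 then
        (PySem.List.pyRange (max 0 (x - 1)) (min M (x + 2)) 1).flatMap fun i =>
          (PySem.List.pyRange (max 0 (y - 1)) (min N (y + 2)) 1).map fun j => (i, j)
      else []

def pvGuardA (matrix : List (List Int)) (M N : Int) (c : Int × Int) : Bool :=
  pvAGet matrix c.1 c.2 == 1 && pvHasAdjacentZero matrix M N c.1 c.2

def pvGuardB (matrix : List (List Int)) (c : Int × Int) : Bool :=
  pvBGet matrix c.1 c.2 == 1

theorem pvFoldl_ite_list {α σ : Type} (c : Prop) [Decidable c] (l : List α) (f : σ → α → σ) (s : σ) :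
    (if c then l else []).foldl f s = if c then l.foldl f s else s := by
  split <;> simp

theorem pvCellsA_nonneg (M N : Int) :
    ∀ c ∈ pvCellsA M N, 0 ≤ c.1 ∧ 0 ≤ c.2 := by
  intro c hc
  simp only [pvCellsA, List.mem_flatMap, List.mem_map, PySem.List.mem_pyRange_one] at hc
  obtain ⟨x, ⟨hx, -⟩, y, ⟨hy, -⟩, rfl⟩ := hc
  exact ⟨hx, hy⟩

theorem pvCellsB_nonneg (matrix : List (List Int)) (M N : Int) :
    ∀ c ∈ pvCellsB matrix M N, 0 ≤ c.1 ∧ 0 ≤ c.2 := by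
  intro c hc
  simp only [pvCellsB, List.mem_flatMap, PySem.List.mem_pyRange_one] at hc
  obtain ⟨x, -, y, -, hin⟩ := hc
  split at hin
  · simp only [List.mem_flatMap, List.mem_map, PySem.List.mem_pyRange_one] at hin
    obtain ⟨a, ⟨ha, -⟩, b, ⟨hb, -⟩, rfl⟩ := hin
    exact ⟨le_trans (le_max_left _ _) ha, le_trans (le_max_left _ _) hb⟩
  · simp at hin

theorem pvA_flat (matrix : List (List Int)) :
    replace_adjacent_ones matrix =
      (pvCellsA (PySem.List.len matrix) (PySem.List.len (PySem.List.pyGetD matrix 0 []))).foldl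
        (fun mc c => if pvGuardA matrix (PySem.List.len matrix) (PySem.List.len (PySem.List.pyGetD matrix 0 [])) c then
            PySem.List.pySetD mc c.1 (PySem.List.pySetD (PySem.List.pyGetD mc c.1 []) c.2 0)
          else mc) matrix := by
  simp only [replace_adjacent_ones, pvCellsA, pvGuardA, List.foldl_flatMap, List.foldl_map]

theorem pvB_flat (matrix : List (List Int)) :
    replace_adjacent_ones_alt matrix =
      (pvCellsB matrix (PySem.List.len matrix) (PySem.List.len (PySem.List.pyGetD matrix 0 []))).foldl
        (fun mc c => if pvGuardB matrix c then
            PySem.List.pySetD mc c.1 (PySem.List.pySetD (PySem.List.pyGetD mc c.1 []) c.2 0)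
          else mc) matrix := by
  simp only [replace_adjacent_ones_alt, pvCellsB, pvGuardB, List.foldl_flatMap,
    List.foldl_map, pvFoldl_ite_list, List.map_id']

theorem pvHasAdj_iff (matrix : List (List Int)) (M N x y : Int) :
    pvHasAdjacentZero matrix M N x y = true ↔
      ∃ dx dy : Int, -1 ≤ dx ∧ dx ≤ 1 ∧ -1 ≤ dy ∧ dy ≤ 1 ∧ ¬(dx = 0 ∧ dy = 0) ∧
        0 ≤ x + dx ∧ x + dx < M ∧ 0 ≤ y + dy ∧ y + dy < N ∧
        pvAGet matrix (x + dx) (y + dy) = 0 := by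
  simp only [pvHasAdjacentZero, List.any_eq_true]
  constructor
  · rintro ⟨dx, hdx, dy, hdy, h⟩
    simp only [List.mem_cons, List.not_mem_nil, or_false] at hdx hdy
    split at h
    · exact absurd h (by simp)
    · rename_i hcond
      simp only [Bool.and_eq_true, beq_iff_eq, not_and] at hcond
      simp only [pvIsValid, Bool.and_eq_true, beq_iff_eq, decide_eq_true_eq] at h
      refine ⟨dx, dy, by rcases hdx with rfl|rfl|rfl <;> norm_num,
        by rcases hdx with rfl|rfl|rfl <;> norm_num,
        by rcases hdy with rfl|rfl|rfl <;> norm_num,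
        by rcases hdy with rfl|rfl|rfl <;> norm_num, ?_,
        h.1.1.1, h.1.1.2, h.1.2.1, h.1.2.2, h.2⟩
      rintro ⟨rfl, rfl⟩
      simp at hcond
  · rintro ⟨dx, dy, h1, h2, h3, h4, hne, hx0, hxM, hy0, hyN, hget⟩
    refine ⟨dx, by simp; omega, dy, by simp; omega, ?_⟩
    rw [if_neg (by simp only [Bool.and_eq_true, beq_iff_eq]; rintro ⟨rfl, rfl⟩; exact hne ⟨rfl, rfl⟩)]
    simp [pvIsValid, hget, hx0, hxM, hy0, hyN]

-- the two flat folds fire at the same set of positions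
theorem pvCond_iff (matrix : List (List Int)) (M N : Int) (i j : Nat) :
    (∃ c ∈ pvCellsA M N, pvGuardA matrix M N c = true ∧ c.1.toNat = i ∧ c.2.toNat = j) ↔
    (∃ c ∈ pvCellsB matrix M N, pvGuardB matrix c = true ∧ c.1.toNat = i ∧ c.2.toNat = j) := by
  constructor
  · rintro ⟨⟨x, y⟩, hmem, hg, hi, hj⟩
    simp only [pvCellsA, List.mem_flatMap, List.mem_map, PySem.List.mem_pyRange_one] at hmem
    obtain ⟨x', ⟨hx0, hxM⟩, y', ⟨hy0, hyN⟩, heq⟩ := hmem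
    obtain ⟨rfl, rfl⟩ := Prod.mk.injEq .. ▸ heq
    simp only [pvGuardA, Bool.and_eq_true, beq_iff_eq] at hg
    obtain ⟨hone, hadj⟩ := hg
    rw [pvHasAdj_iff] at hadj
    obtain ⟨dx, dy, hd1, hd2, hd3, hd4, hne, ha0, haM, hb0, hbN, hzero⟩ := hadj
    refine ⟨(x', y'), ?_, ?_, hi, hj⟩
    · simp only [pvCellsB, List.mem_flatMap]
      refine ⟨x' + dx, PySem.List.mem_pyRange_one.mpr ⟨ha0, haM⟩, ?_⟩
      refine ⟨y' + dy, PySem.List.mem_pyRange_one.mpr ⟨hb0, hbN⟩, ?_⟩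
      rw [if_pos (by simp only [beq_iff_eq]; exact hzero)]
      simp only [List.mem_flatMap, List.mem_map]
      refine ⟨x', PySem.List.mem_pyRange_one.mpr ⟨by omega, by omega⟩,
        y', PySem.List.mem_pyRange_one.mpr ⟨by omega, by omega⟩, rfl⟩
    · simp only [pvGuardB, beq_iff_eq]
      exact hone
  · rintro ⟨⟨a, b⟩, hmem, hg, hi, hj⟩
    simp only [pvCellsB, List.mem_flatMap, PySem.List.mem_pyRange_one] at hmem
    obtain ⟨x, ⟨hx0, hxM⟩, y, ⟨hy0, hyN⟩, hin⟩ := hmem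
    split at hin
    · rename_i hzero
      simp only [beq_iff_eq] at hzero
      simp only [List.mem_flatMap, List.mem_map, PySem.List.mem_pyRange_one] at hin
      obtain ⟨a', ⟨ha1, ha2⟩, b', ⟨hb1, hb2⟩, heq⟩ := hin
      obtain ⟨rfl, rfl⟩ := Prod.mk.injEq .. ▸ heq
      simp only [pvGuardB, beq_iff_eq] at hg
      refine ⟨(a', b'), ?_, ?_, hi, hj⟩
      · simp only [pvCellsA, List.mem_flatMap, List.mem_map]
        exact ⟨a', PySem.List.mem_pyRange_one.mpr ⟨by omega, by omega⟩,
          b', PySem.List.mem_pyRange_one.mpr ⟨by omega, by omega⟩, rfl⟩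
      · simp only [pvGuardA, Bool.and_eq_true, beq_iff_eq]
        refine ⟨hg, ?_⟩
        rw [pvHasAdj_iff]
        refine ⟨x - a', y - b', by omega, by omega, by omega, by omega, ?_, by omega, by omega,
          by omega, by omega, ?_⟩
        · rintro ⟨hdx, hdy⟩
          have hax : a' = x := by omega
          have hby : b' = y := by omega
          rw [hax, hby] at hg
          rw [hg] at hzero
          norm_num at hzero
        · have e1 : a' + (x - a') = x := by ring
          have e2 : b' + (y - b') = y := by ring
          rw [e1, e2]
          exact hzero
    · simp at hin

-- ===== VERDICT (by name: the statement is the Claim_ definition above) =====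
theorem replace_adjacent_ones_spec : Claim_equal_replace_adjacent_ones := by
  intro matrix _ _
  unfold Spec_replace_adjacent_ones
  rw [pvA_flat, pvB_flat]
  apply pvMatrix_ext
  · rw [pvShape_foldl_write (pvGuardA matrix _ _) Prod.fst Prod.snd _ matrix (pvCellsA_nonneg _ _),
      pvShape_foldl_write (pvGuardB matrix) Prod.fst Prod.snd _ matrix (pvCellsB_nonneg _ _ _)]
  · intro i j
    rw [pvEnt_foldl_write (pvGuardA matrix _ _) Prod.fst Prod.snd _ matrix i j
        (pvCellsA_nonneg _ _),
      pvEnt_foldl_write (pvGuardB matrix) Prod.fst Prod.snd _ matrix i j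
        (pvCellsB_nonneg _ _ _)]
    exact if_congr (pvCond_iff matrix _ _ i j) rfl rfl
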